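-- pv_equiv track=rewrite | github.com/greenwyrt/plover2CAT | plover_cat/stroke_funcs.py | split_stroke_data
-- ===== SOURCE A (Python) =====
-- def split_stroke_data(stroke_data, start):
--     """Returns tuple of lists of steno strokes, split at position start.
--
--     Args:
--         stroke_data (list): list of steno stroke elements in
--             [time, steno_strokes, translation, ...] format
--         start (int): position for splitting, based on text lengths in
--             the translation element of stroke
--
--     Returns:
--         tuple of two lists of steno strokes, split at the position
--             specified by the start argument based on the translation lengths.
--
--     """
--     # hack here if stroke data only has one stroke, so not list of list
--     if len(stroke_data) > 0:
--         if not all(isinstance(el, list) for el in stroke_data):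
--             stroke_data = [stroke_data]
--     split = False
--     first_part = []
--     second_part = []
--     if start == 0:
--         return [], stroke_data
--     for stroke in stroke_data:
--         start = start - len(stroke[2])
--         if start > 0:
--             first_part.append(stroke)
--         elif start == 0:
--             # special case but likely most common when split occurs at boundary of stroke
--             first_part.append(stroke)
--             split = True
--         else:
--             if split:
--                 second_part.append(stroke)
--             else:
--                 text = stroke[2]
--                 # arbitrarily, the stroke data goes with first part if middle of split
--                 # the second part will still have the time
--                 first_part.append([stroke[0], stroke[1], text[:start]])
--                 second_part.append([stroke[0], "", text[start:]])
--                 split = True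
--     if len(first_part) > 0:
--         if not all(isinstance(el, list) for el in first_part):
--             first_part = [first_part]
--     if len(second_part) > 0:
--         if not all(isinstance(el, list) for el in second_part):
--             second_part = [second_part]
--     return first_part, second_part
-- ===== SOURCE B (Python) =====
-- def split_stroke_data(stroke_data, start):
--     """Split steno strokes at position start (by translation lengths)."""
--     # hack here if stroke data only has one stroke, so not list of list
--     if len(stroke_data) > 0:
--         if not all(isinstance(el, list) for el in stroke_data):
--             stroke_data = [stroke_data]
--     if start == 0:
--         return [], stroke_data
--     # cumulative translation lengths
--     cum = []
--     total = 0
--     for stroke in stroke_data: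
--         total += len(stroke[2])
--         cum.append(total)
--     n = len(stroke_data)
--     # first index whose cumulative length reaches start
--     i = 0
--     while i < n and cum[i] < start:
--         i += 1
--     if i < n and cum[i] == start:
--         # boundary falls exactly on a stroke edge; zero-length strokes
--         # sitting on the boundary also belong to the first part
--         while i + 1 < n and cum[i + 1] == start:
--             i += 1
--         return stroke_data[:i + 1], stroke_data[i + 1:]
--     if i == n:
--         # start lies past the total translation length
--         return stroke_data, []
--     # boundary falls inside stroke i: split its translation text
--     stroke = stroke_data[i]
--     text = stroke[2]
--     neg = start - cum[i]
--     return (stroke_data[:i] + [[stroke[0], stroke[1], text[:neg]]],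
--             [[stroke[0], "", text[neg:]]] + stroke_data[i + 1:])
-- ===== Notes on version B (the rewrite author's own statement) =====
-- stated objective: alternative
-- what changed: A threads a mutable countdown and a 'split' flag through one accumulating loop; B precomputes the cumulative translation lengths, scans them once for the split index (extending it over zero-length strokes sitting exactly on the boundary), and then builds both parts directly with slices, splitting the one mid-boundary stroke's text by a negative index.
import Mathlib
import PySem

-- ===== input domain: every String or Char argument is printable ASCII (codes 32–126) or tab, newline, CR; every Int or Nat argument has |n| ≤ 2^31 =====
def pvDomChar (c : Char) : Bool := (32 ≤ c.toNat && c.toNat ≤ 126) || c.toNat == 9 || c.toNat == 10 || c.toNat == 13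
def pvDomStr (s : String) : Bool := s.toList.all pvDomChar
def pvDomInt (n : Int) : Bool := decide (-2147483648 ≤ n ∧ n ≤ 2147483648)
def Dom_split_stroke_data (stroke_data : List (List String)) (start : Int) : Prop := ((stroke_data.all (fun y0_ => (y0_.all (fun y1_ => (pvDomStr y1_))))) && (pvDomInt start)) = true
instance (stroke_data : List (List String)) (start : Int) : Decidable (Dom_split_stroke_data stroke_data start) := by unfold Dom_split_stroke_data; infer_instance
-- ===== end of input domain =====

-- B replaces A's running-countdown accumulator loop by a cumulative-length list that is
-- scanned once for the split index, building both parts with slices (alternative decomposition).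


-- ===== PORT A =====
-- A's for-loop with mutable (split, start, first_part, second_part), transliterated as
-- structural recursion over the stroke list.  stroke[k] is ported as PySem.List.pyGetD
-- stroke k "" — exact under Pre_ (strokes of length ≥ 3), where Python never raises.
-- A's isinstance list-of-list normalization guards are untypable here (stroke_data is
-- List (List String)) and always pass on this domain, so they vanish in the port.
def pvLoopA : List (List String) → Bool → Int → List (List String) → List (List String) →
    List (List String) × List (List String)
  | [], _, _, first, second => (first, second)
  | stroke :: rest, split, start, first, second =>
    let text := PySem.List.pyGetD stroke 2 ""
    let start' := start - PySem.Str.len text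
    if 0 < start' then
      pvLoopA rest split start' (first ++ [stroke]) second
    else if start' = 0 then
      pvLoopA rest true start' (first ++ [stroke]) second
    else if split then
      pvLoopA rest split start' first (second ++ [stroke])
    else
      pvLoopA rest true start'
        (first ++ [[PySem.List.pyGetD stroke 0 "", PySem.List.pyGetD stroke 1 "",
                    PySem.Str.slice text none (some start')]])
        (second ++ [[PySem.List.pyGetD stroke 0 "", "",
                    PySem.Str.slice text (some start') none]])

def split_stroke_data (stroke_data : List (List String)) (start : Int) :
    List (List String) × List (List String) :=
  if start = 0 then ([], stroke_data)
  else pvLoopA stroke_data false start [] []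

-- ===== PORT B =====
-- cumulative translation lengths
def pvCum : Int → List (List String) → List Int
  | _, [] => []
  | total, s :: rest =>
    let total' := total + PySem.Str.len (PySem.List.pyGetD s 2 "")
    total' :: pvCum total' rest

-- while i < n and cum[i] < start: i += 1
def pvScan (start : Int) : List Int → Nat
  | [] => 0
  | c :: rest => if c < start then pvScan start rest + 1 else 0

-- while i+1 < n and cum[i+1] == start: i += 1  (run length of boundary-equal entries)
def pvRun (start : Int) : List Int → Nat
  | [] => 0
  | c :: rest => if c = start then pvRun start rest + 1 else 0

def split_stroke_data_alt (stroke_data : List (List String)) (start : Int) :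
    List (List String) × List (List String) :=
  if start = 0 then ([], stroke_data)
  else
    let cum := pvCum 0 stroke_data
    let i := pvScan start cum
    if i < stroke_data.length ∧ cum.getD i 0 = start then
      let j := i + pvRun start (cum.drop (i + 1))
      (stroke_data.take (j + 1), stroke_data.drop (j + 1))
    else if i = stroke_data.length then (stroke_data, [])
    else
      let stroke := stroke_data.getD i []
      let text := PySem.List.pyGetD stroke 2 ""
      let neg := start - cum.getD i 0
      (stroke_data.take i ++
        [[PySem.List.pyGetD stroke 0 "", PySem.List.pyGetD stroke 1 "",
          PySem.Str.slice text none (some neg)]],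
       [[PySem.List.pyGetD stroke 0 "", "",
          PySem.Str.slice text (some neg) none]] ++ stroke_data.drop (i + 1))

-- ===== PRECONDITION & SPEC =====
-- Pre_ excludes only inputs where Python A raises IndexError: unless start == 0 (early
-- return), A reads stroke[2] of every stroke (and stroke[0]/stroke[1] of a split one),
-- so every stroke must have at least 3 elements.
def Pre_split_stroke_data (stroke_data : List (List String)) (start : Int) : Prop :=
  start = 0 ∨ ∀ s ∈ stroke_data, 3 ≤ s.length
instance (stroke_data : List (List String)) (start : Int) : Decidable (Pre_split_stroke_data stroke_data start) := by unfold Pre_split_stroke_data; infer_instance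
def pvWitness_split_stroke_data : List (List String) × Int :=
  ([["10", "STROEBG", "stroke "], ["11", "TKA*EUT", "data"]], 9)

def Spec_split_stroke_data (stroke_data : List (List String)) (start : Int) (out : List (List String) × List (List String)) : Prop := out = split_stroke_data_alt stroke_data start
instance (stroke_data : List (List String)) (start : Int) (out : List (List String) × List (List String)) : Decidable (Spec_split_stroke_data stroke_data start out) := by unfold Spec_split_stroke_data; infer_instance

-- ===== CLAIM (what is proved, stated in full; the proofs are below) =====
def Claim_equal_split_stroke_data : Prop := ∀ (stroke_data : List (List String)) (start : Int), Dom_split_stroke_data stroke_data start → Pre_split_stroke_data stroke_data start → Spec_split_stroke_data stroke_data start (split_stroke_data stroke_data start)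

-- ===== LEMMAS AND PROOFS =====

-- the else-branch of B's port, as a standalone function for the induction
def pvCore (stroke_data : List (List String)) (start : Int) :
    List (List String) × List (List String) :=
  let cum := pvCum 0 stroke_data
  let i := pvScan start cum
  if i < stroke_data.length ∧ cum.getD i 0 = start then
    let j := i + pvRun start (cum.drop (i + 1))
    (stroke_data.take (j + 1), stroke_data.drop (j + 1))
  else if i = stroke_data.length then (stroke_data, [])
  else
    let stroke := stroke_data.getD i []
    let text := PySem.List.pyGetD stroke 2 ""
    let neg := start - cum.getD i 0
    (stroke_data.take i ++
      [[PySem.List.pyGetD stroke 0 "", PySem.List.pyGetD stroke 1 "",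
        PySem.Str.slice text none (some neg)]],
     [[PySem.List.pyGetD stroke 0 "", "",
        PySem.Str.slice text (some neg) none]] ++ stroke_data.drop (i + 1))

theorem pvAlt_eq_core (stroke_data : List (List String)) (start : Int) :
    split_stroke_data_alt stroke_data start =
      if start = 0 then ([], stroke_data) else pvCore stroke_data start := rfl

theorem pvLen_nonneg (t : String) : 0 ≤ PySem.Str.len t := by
  simp [PySem.Str.len_eq]

theorem pvCum_shift (l : List (List String)) : ∀ a b : Int,
    pvCum (a + b) l = (pvCum b l).map (a + ·) := by
  induction l with
  | nil => intro a b; simp [pvCum]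
  | cons s rest ih =>
      intro a b
      simp only [pvCum, List.map_cons, add_assoc]
      rw [ih a _]

theorem pvCum_shift₀ (l : List (List String)) (a : Int) :
    pvCum a l = (pvCum 0 l).map (a + ·) := by
  simpa using pvCum_shift l a 0

theorem pvScan_map (c : List Int) (a start : Int) :
    pvScan start (c.map (a + ·)) = pvScan (start - a) c := by
  induction c with
  | nil => simp [pvScan]
  | cons x rest ih =>
      simp only [List.map_cons, pvScan, ih]
      have : a + x < start ↔ x < start - a := by omega
      simp [this]

theorem pvRun_map (c : List Int) (a start : Int) :
    pvRun start (c.map (a + ·)) = pvRun (start - a) c := by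
  induction c with
  | nil => simp [pvRun]
  | cons x rest ih =>
      simp only [List.map_cons, pvRun, ih]
      have : a + x = start ↔ x = start - a := by omega
      simp [this]

theorem pvScan_le_length (c : List Int) (start : Int) : pvScan start c ≤ c.length := by
  induction c with
  | nil => simp [pvScan]
  | cons x rest ih => simp only [pvScan, List.length_cons]; split <;> omega

theorem pvCum_length (l : List (List String)) : ∀ a, (pvCum a l).length = l.length := by
  induction l with
  | nil => intro a; rfl
  | cons s rest ih => intro a; simp [pvCum, ih]

theorem pvGetD_map_add (c : List Int) (a : Int) (i : Nat) (h : i < c.length) :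
    (c.map (a + ·)).getD i 0 = a + c.getD i 0 := by
  rw [List.getD_eq_getElem?_getD, List.getD_eq_getElem?_getD]
  rw [List.getElem?_eq_getElem (by simpa using h), List.getElem?_eq_getElem h]
  simp

-- negative phase: once split is set and the countdown is negative, everything goes second
theorem pvLoopA_neg (l : List (List String)) : ∀ (start : Int), start < 0 →
    ∀ first second, pvLoopA l true start first second = (first, second ++ l) := by
  induction l with
  | nil => intro start h first second; simp [pvLoopA]
  | cons s rest ih =>
      intro start h first second
      have hL := pvLen_nonneg (PySem.List.pyGetD s 2 "")
      simp only [pvLoopA]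
      rw [if_neg (by omega), if_neg (by omega), if_pos trivial, ih _ (by omega)]
      simp

-- zero phase: after an exact boundary, leading zero-length strokes still go first
theorem pvLoopA_zero (l : List (List String)) :
    ∀ first second, pvLoopA l true 0 first second =
      (first ++ l.take (pvRun 0 (pvCum 0 l)), second ++ l.drop (pvRun 0 (pvCum 0 l))) := by
  induction l with
  | nil => intro first second; simp [pvLoopA, pvRun, pvCum]
  | cons s rest ih =>
      intro first second
      have hL := pvLen_nonneg (PySem.List.pyGetD s 2 "")
      by_cases h0 : PySem.Str.len (PySem.List.pyGetD s 2 "") = 0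
      · simp only [pvLoopA, h0, sub_zero]
        rw [if_neg (by omega), if_pos trivial, ih]
        simp only [pvCum, zero_add, h0, pvRun, if_true]
        simp [List.take_succ_cons, List.drop_succ_cons, List.append_assoc]
      · simp only [pvLoopA]
        rw [if_neg (by omega), if_neg (by omega), if_pos trivial,
          pvLoopA_neg rest _ (by omega)]
        simp only [pvCum, zero_add, pvRun, if_neg h0]
        simp

-- one unfolding step of B's core at a cons, for positive start
theorem pvCore_cons (s : List String) (rest : List (List String)) (start : Int) :
    pvCore (s :: rest) start =
      (if 0 < start - PySem.Str.len (PySem.List.pyGetD s 2 "") then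
         ((s :: (pvCore rest (start - PySem.Str.len (PySem.List.pyGetD s 2 ""))).1,
           (pvCore rest (start - PySem.Str.len (PySem.List.pyGetD s 2 ""))).2))
       else if start - PySem.Str.len (PySem.List.pyGetD s 2 "") = 0 then
         (s :: rest.take (pvRun 0 (pvCum 0 rest)), rest.drop (pvRun 0 (pvCum 0 rest)))
       else
         ([[PySem.List.pyGetD s 0 "", PySem.List.pyGetD s 1 "",
            PySem.Str.slice (PySem.List.pyGetD s 2 "") none
              (some (start - PySem.Str.len (PySem.List.pyGetD s 2 "")))]],
          [[PySem.List.pyGetD s 0 "", "",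
            PySem.Str.slice (PySem.List.pyGetD s 2 "")
              (some (start - PySem.Str.len (PySem.List.pyGetD s 2 ""))) none]] ++ rest)) := by
  have hL := pvLen_nonneg (PySem.List.pyGetD s 2 "")
  simp only [pvCore, pvCum, pvScan, zero_add, pvCum_shift₀ rest (PySem.Str.len (PySem.List.pyGetD s 2 ""))]
  by_cases hgt : 0 < start - PySem.Str.len (PySem.List.pyGetD s 2 "")
  · rw [if_pos (by omega : PySem.Str.len (PySem.List.pyGetD s 2 "") < start), if_pos hgt,
      pvScan_map]
    set L := PySem.Str.len (PySem.List.pyGetD s 2 "") with hLdef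
    set c := pvCum 0 rest with hcdef
    set i := pvScan (start - L) c with hidef
    have hlen : c.length = rest.length := pvCum_length rest 0
    have hle : i ≤ rest.length := by have := pvScan_le_length c (start - L); omega
    have hgd : i < rest.length → (List.map (fun x => L + x) c).getD i 0 = L + c.getD i 0 :=
      fun hi => pvGetD_map_add c L i (by omega)
    simp only [List.getD_cons_succ, List.length_cons, List.drop_succ_cons]
    rw [← List.map_drop, pvRun_map]
    by_cases hi : i < rest.length
    · rw [hgd hi]
      by_cases hb : c.getD i 0 = start - L
      · rw [if_pos (⟨by omega, by omega⟩ : i + 1 < rest.length + 1 ∧ L + c.getD i 0 = start),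
          if_pos ⟨hi, hb⟩]
        have e1 : i + 1 + pvRun (start - L) (List.drop (i + 1) c) + 1 =
            (i + pvRun (start - L) (List.drop (i + 1) c) + 1) + 1 := by omega
        have e2 : i + 1 + pvRun (start - L) (List.drop (i + 1) c) =
            i + pvRun (start - L) (List.drop (i + 1) c) + 1 := by omega
        rw [e1, List.take_succ_cons, e2]
      · rw [if_neg (show ¬ (i + 1 < rest.length + 1 ∧ L + c.getD i 0 = start) by
            rintro ⟨-, h2⟩; omega),
          if_neg (show ¬ (i < rest.length ∧ c.getD i 0 = start - L) by
            rintro ⟨-, h2⟩; exact hb h2),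
          if_neg (show ¬ (i + 1 = rest.length + 1) by omega),
          if_neg (show ¬ (i = rest.length) by omega),
          List.take_succ_cons, sub_add_eq_sub_sub]
        rfl
    · have hieq : i = rest.length := by omega
      rw [if_neg (show ¬ (i + 1 < rest.length + 1 ∧
            (List.map (fun x => L + x) c).getD i 0 = start) by rintro ⟨h1, -⟩; omega),
        if_neg (show ¬ (i < rest.length ∧ c.getD i 0 = start - L) by rintro ⟨h1, -⟩; omega),
        if_pos (show i + 1 = rest.length + 1 by omega), if_pos hieq]
  · rw [if_neg (show ¬ PySem.Str.len (PySem.List.pyGetD s 2 "") < start by omega),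
      if_neg hgt]
    by_cases heq : start - PySem.Str.len (PySem.List.pyGetD s 2 "") = 0
    · rw [if_pos heq,
        if_pos (show 0 < (s :: rest).length ∧
            (PySem.Str.len (PySem.List.pyGetD s 2 "") ::
              List.map (fun x => PySem.Str.len (PySem.List.pyGetD s 2 "") + x)
                (pvCum 0 rest)).getD 0 0 = start from
          ⟨by simp, by simp only [List.getD_cons_zero]; omega⟩)]
      simp only [zero_add, List.drop_succ_cons]
      rw [List.drop_zero, pvRun_map, heq, List.take_succ_cons]
    · rw [if_neg heq]
      rw [if_neg (show ¬ (0 < (s :: rest).length ∧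
            (PySem.Str.len (PySem.List.pyGetD s 2 "") ::
              List.map (fun x => PySem.Str.len (PySem.List.pyGetD s 2 "") + x)
                (pvCum 0 rest)).getD 0 0 = start) by
          rintro ⟨-, hc⟩; simp only [List.getD_cons_zero] at hc; omega),
        if_neg (show ¬ ((0:Nat) = (s :: rest).length) by simp)]
      simp

theorem pvLoopA_pos (l : List (List String)) : ∀ (start : Int), 0 < start →
    ∀ first, pvLoopA l false start first [] =
      (first ++ (pvCore l start).1, (pvCore l start).2) := by
  induction l with
  | nil => intro start h first; simp [pvLoopA, pvCore, pvCum, pvScan]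
  | cons s rest ih =>
      intro start h first
      have hL := pvLen_nonneg (PySem.List.pyGetD s 2 "")
      rw [pvCore_cons]
      simp only [pvLoopA]
      by_cases hgt : 0 < start - PySem.Str.len (PySem.List.pyGetD s 2 "")
      · rw [if_pos hgt, if_pos hgt, ih _ hgt (first ++ [s])]
        simp
      · by_cases heq : start - PySem.Str.len (PySem.List.pyGetD s 2 "") = 0
        · rw [if_neg hgt, if_neg hgt, if_pos heq, if_pos heq, heq, pvLoopA_zero]
          simp
        · rw [if_neg hgt, if_neg hgt, if_neg heq, if_neg heq, if_neg (by simp),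
            pvLoopA_neg rest _ (by omega)]
          simp

theorem pvNeg_top (l : List (List String)) (start : Int) (h : start < 0) :
    pvLoopA l false start [] [] = pvCore l start := by
  cases l with
  | nil => simp [pvLoopA, pvCore, pvCum, pvScan]
  | cons s rest =>
      have hL := pvLen_nonneg (PySem.List.pyGetD s 2 "")
      simp only [pvLoopA, pvCore, pvCum, pvScan, zero_add]
      rw [if_neg (by omega), if_neg (by omega), if_neg (by simp)]
      rw [pvLoopA_neg rest _ (by omega)]
      rw [if_neg (by omega : ¬ PySem.Str.len (PySem.List.pyGetD s 2 "") < start)]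
      rw [if_neg (by
        rintro ⟨-, hc⟩
        simp only [List.getD_cons_zero] at hc
        omega)]
      rw [if_neg (by simp)]
      simp

-- ===== VERDICT (by name: the statement is the Claim_ definition above) =====
theorem split_stroke_data_spec : Claim_equal_split_stroke_data := by
  intro stroke_data start _ _
  unfold Spec_split_stroke_data
  rw [pvAlt_eq_core, split_stroke_data]
  by_cases h0 : start = 0
  · simp [h0]
  · rw [if_neg h0, if_neg h0]
    rcases lt_or_gt_of_ne h0 with h | h
    · exact pvNeg_top stroke_data start h
    · simpa using pvLoopA_pos stroke_data start h []
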